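-- pv_equiv track=rewrite | github.com/ASSERT-KTH/Mokav | experiments/pynguin/c4b/return-lst/generated_tests/src_817/1/src_817.py | func
-- ===== SOURCE A (Python) =====
-- def func(*args):
-- 	ret_values = []
--
--
-- 	def f(n):
-- 	    res = 1
-- 	    for i in range(1, (n + 1)):
-- 	        res *= i
-- 	    return res
--
-- 	def choose(n, k):
-- 	    return (f(n) // (f(k) * f((n - k))))
-- 	N = int(args[0])
-- 	ret_values.append(int(((choose(N, 5) + choose(N, 6)) + choose(N, 7))))
--
-- 	return ret_values
-- ===== SOURCE B (Python) =====
-- def func(*args):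
--     N = int(args[0])
--     if N < 0:
--         return [0]
--     p5 = N * (N - 1) * (N - 2) * (N - 3) * (N - 4)
--     p6 = p5 * (N - 5)
--     p7 = p6 * (N - 6)
--     return [p5 // 120 + p6 // 720 + p7 // 5040]
-- ===== Notes on version B (the rewrite author's own statement) =====
-- stated objective: faster
-- what changed: replaces the three O(N) factorial loops per binomial with constant-length falling-factorial products divided by constant factorials, returning zero directly for negative input
import Mathlib
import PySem

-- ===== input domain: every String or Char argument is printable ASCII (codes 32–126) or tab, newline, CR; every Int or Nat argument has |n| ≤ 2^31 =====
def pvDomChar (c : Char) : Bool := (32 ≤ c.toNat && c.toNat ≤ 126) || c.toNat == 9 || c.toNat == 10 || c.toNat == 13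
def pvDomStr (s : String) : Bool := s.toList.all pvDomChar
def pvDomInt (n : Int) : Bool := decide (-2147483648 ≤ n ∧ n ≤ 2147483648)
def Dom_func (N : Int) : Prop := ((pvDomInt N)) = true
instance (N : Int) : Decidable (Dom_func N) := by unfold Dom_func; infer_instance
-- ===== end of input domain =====

-- B replaces A's O(N) factorial loops with O(1) fixed-length falling-factorial products; objective: faster (asymptotic).

-- ===== PORT A =====
-- inner helper f(n): res = 1; for i in range(1, n+1): res *= i
def pyFact (n : Int) : Int :=
  (PySem.List.pyRange 1 (n + 1) 1).foldl (fun res i => res * i) 1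

-- inner helper choose(n, k) = f(n) // (f(k) * f(n-k))
def pyChooseA (n k : Int) : Int :=
  PySem.Int.floordiv (pyFact n) (pyFact k * pyFact (n - k))

def func (N : Int) : List Int :=
  [pyChooseA N 5 + pyChooseA N 6 + pyChooseA N 7]

-- ===== PORT B =====
def func_alt (N : Int) : List Int :=
  if N < 0 then [0]
  else
    let p5 := N * (N - 1) * (N - 2) * (N - 3) * (N - 4)
    let p6 := p5 * (N - 5)
    let p7 := p6 * (N - 6)
    [PySem.Int.floordiv p5 120 + PySem.Int.floordiv p6 720 + PySem.Int.floordiv p7 5040]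

-- ===== PRECONDITION & SPEC =====
def Spec_func (N : Int) (out : List Int) : Prop := out = func_alt N
instance (N : Int) (out : List Int) : Decidable (Spec_func N out) := by unfold Spec_func; infer_instance

-- ===== CLAIM (what is proved, stated in full; the proofs are below) =====
def Claim_equal_func : Prop := ∀ (N : Int), Dom_func N → Spec_func N (func N)

-- ===== LEMMAS AND PROOFS =====

theorem pyFact_natCast (m : Nat) : pyFact (m : Int) = (Nat.factorial m : Int) := by
  induction m with
  | zero => decide
  | succ m ih =>
      have h : ((m + 1 : Nat) : Int) + 1 = ((m : Int) + 1) + 1 := by omega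
      rw [pyFact, h, PySem.List.pyRange_one_succ_right (by omega)]
      rw [List.foldl_append]
      have : (PySem.List.pyRange 1 ((m : Int) + 1) 1).foldl (fun res i => res * i) 1
          = pyFact (m : Int) := rfl
      rw [this, ih]
      simp [Nat.factorial_succ]; push_cast; ring

theorem pyFact_eq (n : Int) : pyFact n = (Nat.factorial n.toNat : Int) := by
  rcases lt_or_ge n 0 with h | h
  · have h0 : n.toNat = 0 := Int.toNat_of_nonpos h.le
    rw [pyFact, PySem.List.pyRange_one_eq_nil (by omega), h0]
    simp [Nat.factorial]
  · have : n = (n.toNat : Int) := (Int.toNat_of_nonneg h).symm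
    rw [this, pyFact_natCast, Int.toNat_natCast]

-- the common mathematical value: the generalised binomial (0 for negative N)
def chooseZ (N : Int) (k : Nat) : Int :=
  if N < 0 then 0 else (Nat.choose N.toNat k : Int)

theorem pyChooseA_eq (N : Int) (k : Nat) (hk : 2 ≤ k) :
    pyChooseA N (k : Int) = chooseZ N k := by
  rw [pyChooseA, pyFact_eq, pyFact_eq, pyFact_eq]
  have hkk : ((k : Int)).toNat = k := Int.toNat_natCast k
  rw [hkk, chooseZ]
  rcases lt_or_ge N 0 with h | h
  · have h0 : N.toNat = 0 := Int.toNat_of_nonpos h.le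
    have h1 : (N - (k : Int)).toNat = 0 := Int.toNat_of_nonpos (by omega)
    rw [h0, h1, if_pos h]
    have hd : (Nat.factorial k : Int) * (Nat.factorial 0 : Int)
        = ((Nat.factorial k * Nat.factorial 0 : Nat) : Int) := by push_cast; ring
    rw [hd, PySem.Int.floordiv_natCast]
    have : Nat.factorial 0 / (Nat.factorial k * Nat.factorial 0) = 0 := by
      apply Nat.div_eq_of_lt
      have := Nat.one_lt_factorial.mpr (by omega : 1 < k)
      simp [Nat.factorial]; omega
    rw [this]; simp
  · rw [if_neg (by omega)]
    rcases lt_or_ge N.toNat k with hlt | hge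
    · -- 0 ≤ N < k : numerator N! < denominator k!, quotient 0, choose = 0
      have h1 : (N - (k : Int)).toNat = 0 := Int.toNat_of_nonpos (by omega)
      rw [h1]
      have hd : (Nat.factorial k : Int) * (Nat.factorial 0 : Int)
          = ((Nat.factorial k * Nat.factorial 0 : Nat) : Int) := by push_cast; ring
      rw [hd, PySem.Int.floordiv_natCast]
      have hlt' : Nat.factorial N.toNat < Nat.factorial k * Nat.factorial 0 := by
        have base : Nat.factorial N.toNat < Nat.factorial k := by
          rcases Nat.eq_zero_or_pos N.toNat with h0 | hpos
          · rw [h0]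
            exact Nat.one_lt_factorial.mpr (by omega)
          · exact (Nat.factorial_lt hpos).mpr hlt
        simpa [Nat.factorial] using base
      rw [Nat.div_eq_of_lt hlt', Nat.choose_eq_zero_of_lt hlt]
    · -- k ≤ N : exact division, quotient = choose
      have h1 : (N - (k : Int)).toNat = N.toNat - k := by omega
      rw [h1]
      have hd : (Nat.factorial k : Int) * (Nat.factorial (N.toNat - k) : Int)
          = ((Nat.factorial k * Nat.factorial (N.toNat - k) : Nat) : Int) := by push_cast; ring
      rw [hd, PySem.Int.floordiv_natCast]
      congr 1
      have hmul := Nat.choose_mul_factorial_mul_factorial hge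
      have hpos : 0 < Nat.factorial k * Nat.factorial (N.toNat - k) :=
        Nat.mul_pos (Nat.factorial_pos _) (Nat.factorial_pos _)
      rw [← hmul, mul_assoc, Nat.mul_div_cancel _ hpos]

theorem descProd (N : Int) (hn : 0 ≤ N) (k : Nat) :
    ((List.range k).map (fun i : Nat => N - (i : Int))).prod
      = (Nat.descFactorial N.toNat k : Int) := by
  induction k with
  | zero => simp
  | succ k ih =>
      rw [List.range_succ, List.map_append, List.prod_append, ih]
      simp only [List.map_cons, List.map_nil, List.prod_cons, List.prod_nil, mul_one]
      rw [Nat.descFactorial_succ]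
      rcases lt_or_ge N.toNat k with hk | hk
      · have h0 : Nat.descFactorial N.toNat k = 0 :=
          Nat.descFactorial_eq_zero_iff_lt.mpr hk
        rw [h0]
        simp
      · have hc : ((N.toNat - k : Nat) : Int) = N - (k : Int) := by omega
        rw [Nat.cast_mul, hc]; ring

theorem descDiv (N : Int) (k : Nat) :
    PySem.Int.floordiv ((Nat.descFactorial N.toNat k : Nat) : Int)
        ((Nat.factorial k : Nat) : Int) = (Nat.choose N.toNat k : Int) := by
  rw [PySem.Int.floordiv_natCast]
  rw [← Nat.choose_eq_descFactorial_div_factorial]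

theorem func_eq_chooseZ (N : Int) :
    func N = [chooseZ N 5 + chooseZ N 6 + chooseZ N 7] := by
  rw [func,
      show (5 : Int) = ((5 : Nat) : Int) by norm_num,
      show (6 : Int) = ((6 : Nat) : Int) by norm_num,
      show (7 : Int) = ((7 : Nat) : Int) by norm_num,
      pyChooseA_eq N 5 (by norm_num), pyChooseA_eq N 6 (by norm_num),
      pyChooseA_eq N 7 (by norm_num)]

theorem func_alt_eq_chooseZ (N : Int) :
    func_alt N = [chooseZ N 5 + chooseZ N 6 + chooseZ N 7] := by
  rcases lt_or_ge N 0 with h | h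
  · simp [func_alt, if_pos h, chooseZ]
  · have p5 : N * (N - 1) * (N - 2) * (N - 3) * (N - 4)
        = ((List.range 5).map (fun i : Nat => N - (i : Int))).prod := by
      simp [List.range_succ]; ring
    have p6 : ((List.range 5).map (fun i : Nat => N - (i : Int))).prod * (N - 5)
        = ((List.range 6).map (fun i : Nat => N - (i : Int))).prod := by
      simp [List.range_succ]; ring
    have p7 : ((List.range 6).map (fun i : Nat => N - (i : Int))).prod * (N - 6)
        = ((List.range 7).map (fun i : Nat => N - (i : Int))).prod := by
      simp [List.range_succ]; ring
    simp only [func_alt, if_neg (not_lt.mpr h)]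
    rw [p5, p6, p7, descProd N h 5, descProd N h 6, descProd N h 7]
    rw [show (120 : Int) = ((Nat.factorial 5 : Nat) : Int) by norm_num [Nat.factorial],
        show (720 : Int) = ((Nat.factorial 6 : Nat) : Int) by norm_num [Nat.factorial],
        show (5040 : Int) = ((Nat.factorial 7 : Nat) : Int) by norm_num [Nat.factorial]]
    rw [descDiv N 5, descDiv N 6, descDiv N 7]
    simp [chooseZ, if_neg (not_lt.mpr h)]

-- ===== VERDICT (by name: the statement is the Claim_ definition above) =====
theorem func_spec : Claim_equal_func := by
  intro N _
  unfold Spec_func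
  rw [func_eq_chooseZ, func_alt_eq_chooseZ]
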